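-- pv_equiv track=rewrite | github.com/luisrnandezc/performance-cessna-172 | src/data.py | valid_landing_press_alt
-- ===== SOURCE A (Python) =====
-- def valid_landing_press_alt(landing_press_alt):
--     """Returns the corrected pressure altitude required
--      for landing performance computation.
--     """
--     valid_altitudes = list(range(0, 9000, 1000))
--     max_alt = valid_altitudes[-1]
--     if landing_press_alt > max_alt:
--         return max_alt
--     for valid_alt in valid_altitudes:
--         if landing_press_alt == valid_alt:
--             return valid_alt
--         elif landing_press_alt >= valid_alt + 250:
--             continue
--         else:
--             return valid_alt
-- ===== SOURCE B (Python) =====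
-- def valid_landing_press_alt(landing_press_alt):
--     """Returns the corrected pressure altitude required
--      for landing performance computation.
--     """
--     if landing_press_alt > 8000:
--         return 8000
--     level = 1000 * ((landing_press_alt + 750) // 1000)
--     return level if level > 0 else 0
-- ===== Notes on version B (the rewrite author's own statement) =====
-- stated objective: simpler
-- what changed: Replaced the scan over the list of valid altitude levels with a closed-form floor-division snap clamped to the lowest and highest levels.
import Mathlib
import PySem

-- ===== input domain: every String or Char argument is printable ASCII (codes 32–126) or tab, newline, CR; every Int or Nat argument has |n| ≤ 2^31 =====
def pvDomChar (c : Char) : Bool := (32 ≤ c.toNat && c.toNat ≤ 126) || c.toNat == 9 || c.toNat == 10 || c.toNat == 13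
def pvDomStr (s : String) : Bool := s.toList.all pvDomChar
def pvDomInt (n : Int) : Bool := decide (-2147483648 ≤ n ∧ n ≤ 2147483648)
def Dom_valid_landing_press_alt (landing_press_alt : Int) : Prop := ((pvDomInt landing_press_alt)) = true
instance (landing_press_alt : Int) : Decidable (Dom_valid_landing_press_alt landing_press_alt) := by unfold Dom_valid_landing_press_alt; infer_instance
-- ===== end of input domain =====

-- B replaces A's scan over the valid-altitude list with a closed-form floor-division snap (simpler).

-- ===== PORT A =====
-- the for-loop over valid_altitudes; falling off the end is unreachable (proved implicitly
-- by the equivalence theorem: for x ≤ max_alt the last element always returns), 0 is a dummy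
def pvLoopA (x : Int) : List Int → Int
  | [] => 0
  | v :: rest =>
    if x = v then v
    else if x ≥ v + 250 then pvLoopA x rest
    else v

def valid_landing_press_alt (landing_press_alt : Int) : Int :=
  let valid_altitudes := PySem.List.pyRange 0 9000 1000
  let max_alt := (PySem.List.pyGet? valid_altitudes (-1)).getD 0  -- in range on this literal list
  if landing_press_alt > max_alt then max_alt
  else pvLoopA landing_press_alt valid_altitudes

-- ===== PORT B =====
def valid_landing_press_alt_alt (landing_press_alt : Int) : Int :=
  if landing_press_alt > 8000 then 8000
  else
    let level := 1000 * PySem.Int.floordiv (landing_press_alt + 750) 1000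
    if level > 0 then level else 0

-- ===== PRECONDITION & SPEC =====
def Spec_valid_landing_press_alt (landing_press_alt : Int) (out : Int) : Prop := out = valid_landing_press_alt_alt landing_press_alt
instance (landing_press_alt : Int) (out : Int) : Decidable (Spec_valid_landing_press_alt landing_press_alt out) := by unfold Spec_valid_landing_press_alt; infer_instance

-- ===== CLAIM (what is proved, stated in full; the proofs are below) =====
def Claim_equal_valid_landing_press_alt : Prop := ∀ (landing_press_alt : Int), Dom_valid_landing_press_alt landing_press_alt → Spec_valid_landing_press_alt landing_press_alt (valid_landing_press_alt landing_press_alt)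

-- ===== LEMMAS AND PROOFS =====
theorem pyRange_0_9000_1000 : PySem.List.pyRange 0 9000 1000 = [0, 1000, 2000, 3000, 4000, 5000, 6000, 7000, 8000] := by decide

theorem loopA_cons (x v : Int) (rest : List Int) :
    pvLoopA x (v :: rest) = if x = v then v else if x ≥ v + 250 then pvLoopA x rest else v := rfl

theorem loopA_nil (x : Int) : pvLoopA x [] = 0 := rfl

theorem maxAlt_eq : (PySem.List.pyGet? [(0:Int), 1000, 2000, 3000, 4000, 5000, 6000, 7000, 8000] (-1)).getD 0 = 8000 := by decide

-- ===== VERDICT (by name: the statement is the Claim_ definition above) =====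
theorem valid_landing_press_alt_spec : Claim_equal_valid_landing_press_alt := by
  intro x _
  unfold Spec_valid_landing_press_alt valid_landing_press_alt valid_landing_press_alt_alt
  rw [pyRange_0_9000_1000]
  dsimp only
  rw [maxAlt_eq, PySem.Int.floordiv_eq_ediv_of_pos (by omega : (0:Int) < 1000)]
  by_cases h9 : x > 8000
  · rw [if_pos h9, if_pos h9]
  · rw [if_neg h9, if_neg h9]
    simp only [loopA_cons, loopA_nil]
    by_cases hb : x < 250
    · by_cases heq : x = 0
      · rw [if_pos heq]
        split_ifs <;> omega
      · rw [if_neg heq, if_neg (show ¬x ≥ 0 + 250 by omega)]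
        split_ifs <;> omega
    · by_cases hb : x < 1250
      · rw [if_neg (show ¬x = 0 by omega), if_pos (show x ≥ 0 + 250 by omega)]
        by_cases heq : x = 1000
        · rw [if_pos heq]
          split_ifs <;> omega
        · rw [if_neg heq, if_neg (show ¬x ≥ 1000 + 250 by omega)]
          split_ifs <;> omega
      · by_cases hb : x < 2250
        · rw [if_neg (show ¬x = 0 by omega), if_pos (show x ≥ 0 + 250 by omega)]
          rw [if_neg (show ¬x = 1000 by omega), if_pos (show x ≥ 1000 + 250 by omega)]
          by_cases heq : x = 2000
          · rw [if_pos heq]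
            split_ifs <;> omega
          · rw [if_neg heq, if_neg (show ¬x ≥ 2000 + 250 by omega)]
            split_ifs <;> omega
        · by_cases hb : x < 3250
          · rw [if_neg (show ¬x = 0 by omega), if_pos (show x ≥ 0 + 250 by omega)]
            rw [if_neg (show ¬x = 1000 by omega), if_pos (show x ≥ 1000 + 250 by omega)]
            rw [if_neg (show ¬x = 2000 by omega), if_pos (show x ≥ 2000 + 250 by omega)]
            by_cases heq : x = 3000
            · rw [if_pos heq]
              split_ifs <;> omega
            · rw [if_neg heq, if_neg (show ¬x ≥ 3000 + 250 by omega)]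
              split_ifs <;> omega
          · by_cases hb : x < 4250
            · rw [if_neg (show ¬x = 0 by omega), if_pos (show x ≥ 0 + 250 by omega)]
              rw [if_neg (show ¬x = 1000 by omega), if_pos (show x ≥ 1000 + 250 by omega)]
              rw [if_neg (show ¬x = 2000 by omega), if_pos (show x ≥ 2000 + 250 by omega)]
              rw [if_neg (show ¬x = 3000 by omega), if_pos (show x ≥ 3000 + 250 by omega)]
              by_cases heq : x = 4000
              · rw [if_pos heq]
                split_ifs <;> omega
              · rw [if_neg heq, if_neg (show ¬x ≥ 4000 + 250 by omega)]
                split_ifs <;> omega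
            · by_cases hb : x < 5250
              · rw [if_neg (show ¬x = 0 by omega), if_pos (show x ≥ 0 + 250 by omega)]
                rw [if_neg (show ¬x = 1000 by omega), if_pos (show x ≥ 1000 + 250 by omega)]
                rw [if_neg (show ¬x = 2000 by omega), if_pos (show x ≥ 2000 + 250 by omega)]
                rw [if_neg (show ¬x = 3000 by omega), if_pos (show x ≥ 3000 + 250 by omega)]
                rw [if_neg (show ¬x = 4000 by omega), if_pos (show x ≥ 4000 + 250 by omega)]
                by_cases heq : x = 5000
                · rw [if_pos heq]
                  split_ifs <;> omega
                · rw [if_neg heq, if_neg (show ¬x ≥ 5000 + 250 by omega)]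
                  split_ifs <;> omega
              · by_cases hb : x < 6250
                · rw [if_neg (show ¬x = 0 by omega), if_pos (show x ≥ 0 + 250 by omega)]
                  rw [if_neg (show ¬x = 1000 by omega), if_pos (show x ≥ 1000 + 250 by omega)]
                  rw [if_neg (show ¬x = 2000 by omega), if_pos (show x ≥ 2000 + 250 by omega)]
                  rw [if_neg (show ¬x = 3000 by omega), if_pos (show x ≥ 3000 + 250 by omega)]
                  rw [if_neg (show ¬x = 4000 by omega), if_pos (show x ≥ 4000 + 250 by omega)]
                  rw [if_neg (show ¬x = 5000 by omega), if_pos (show x ≥ 5000 + 250 by omega)]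
                  by_cases heq : x = 6000
                  · rw [if_pos heq]
                    split_ifs <;> omega
                  · rw [if_neg heq, if_neg (show ¬x ≥ 6000 + 250 by omega)]
                    split_ifs <;> omega
                · by_cases hb : x < 7250
                  · rw [if_neg (show ¬x = 0 by omega), if_pos (show x ≥ 0 + 250 by omega)]
                    rw [if_neg (show ¬x = 1000 by omega), if_pos (show x ≥ 1000 + 250 by omega)]
                    rw [if_neg (show ¬x = 2000 by omega), if_pos (show x ≥ 2000 + 250 by omega)]
                    rw [if_neg (show ¬x = 3000 by omega), if_pos (show x ≥ 3000 + 250 by omega)]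
                    rw [if_neg (show ¬x = 4000 by omega), if_pos (show x ≥ 4000 + 250 by omega)]
                    rw [if_neg (show ¬x = 5000 by omega), if_pos (show x ≥ 5000 + 250 by omega)]
                    rw [if_neg (show ¬x = 6000 by omega), if_pos (show x ≥ 6000 + 250 by omega)]
                    by_cases heq : x = 7000
                    · rw [if_pos heq]
                      split_ifs <;> omega
                    · rw [if_neg heq, if_neg (show ¬x ≥ 7000 + 250 by omega)]
                      split_ifs <;> omega
                  · rw [if_neg (show ¬x = 0 by omega), if_pos (show x ≥ 0 + 250 by omega)]
                    rw [if_neg (show ¬x = 1000 by omega), if_pos (show x ≥ 1000 + 250 by omega)]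
                    rw [if_neg (show ¬x = 2000 by omega), if_pos (show x ≥ 2000 + 250 by omega)]
                    rw [if_neg (show ¬x = 3000 by omega), if_pos (show x ≥ 3000 + 250 by omega)]
                    rw [if_neg (show ¬x = 4000 by omega), if_pos (show x ≥ 4000 + 250 by omega)]
                    rw [if_neg (show ¬x = 5000 by omega), if_pos (show x ≥ 5000 + 250 by omega)]
                    rw [if_neg (show ¬x = 6000 by omega), if_pos (show x ≥ 6000 + 250 by omega)]
                    rw [if_neg (show ¬x = 7000 by omega), if_pos (show x ≥ 7000 + 250 by omega)]
                    by_cases heq : x = 8000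
                    · rw [if_pos heq]
                      split_ifs <;> omega
                    · rw [if_neg heq, if_neg (show ¬x ≥ 8000 + 250 by omega)]
                      split_ifs <;> omega
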